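-- pv_equiv track=rewrite | github.com/miskiewiczm/dna-encoder | dna_encoder/utils.py | format_sequence_for_display
-- ===== SOURCE A (Python) =====
-- def format_sequence_for_display(sequence: str, line_length: int = 60) -> str:
--     """
--     Formatuje sekwencję DNA do wyświetlania z podziałem na linie.
--
--     Args:
--         sequence: Sekwencja DNA
--         line_length: Liczba nukleotydów na linię
--
--     Returns:
--         Sformatowana sekwencja z podziałem na linie
--     """
--     if not sequence:
--         return ""
--
--     lines = []
--     for i in range(0, len(sequence), line_length):
--         line = sequence[i:i + line_length]
--         # Dodaj numery pozycji co 10 nukleotydów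
--         formatted_line = ""
--         for j, nucleotide in enumerate(line):
--             if j > 0 and j % 10 == 0:
--                 formatted_line += " "
--             formatted_line += nucleotide
--
--         # Dodaj numer pozycji na początku linii
--         position = i + 1
--         lines.append(f"{position:>6}: {formatted_line}")
--
--     return "\n".join(lines)
-- ===== SOURCE B (Python) =====
-- def format_sequence_for_display(sequence: str, line_length: int = 60) -> str:
--     """Consume the sequence with head/rest slicing instead of index loops."""
--     out = []
--     pos = 1
--     rest = sequence
--     while rest and line_length > 0:
--         line, rest = rest[:line_length], rest[line_length:]
--         pieces = []
--         while line:
--             pieces.append(line[:10])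
--             line = line[10:]
--         out.append(f"{pos:>6}: " + " ".join(pieces))
--         pos += line_length
--     return "\n".join(out)
-- ===== Notes on version B (the rewrite author's own statement) =====
-- stated objective: alternative
-- what changed: A's index-based loops (range over start positions plus a per-nucleotide enumerate with a modulo-10 counter building the line char by char) are replaced by a consume-the-string decomposition: a while loop destructures the remaining string into head line / rest slices, and each line is spaced by collecting 10-character pieces and joining them; no index or counter arithmetic remains.
import Mathlib
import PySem

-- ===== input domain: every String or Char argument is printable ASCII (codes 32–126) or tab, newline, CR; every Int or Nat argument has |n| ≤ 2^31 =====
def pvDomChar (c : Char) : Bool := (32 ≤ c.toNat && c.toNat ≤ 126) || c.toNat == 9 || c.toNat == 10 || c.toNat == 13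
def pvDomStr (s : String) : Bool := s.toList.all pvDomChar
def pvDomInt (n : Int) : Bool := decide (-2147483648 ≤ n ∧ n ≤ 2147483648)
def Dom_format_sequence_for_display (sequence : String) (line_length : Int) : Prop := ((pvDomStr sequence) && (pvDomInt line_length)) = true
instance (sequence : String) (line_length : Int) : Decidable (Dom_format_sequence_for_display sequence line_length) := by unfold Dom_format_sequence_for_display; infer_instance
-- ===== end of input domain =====

-- B replaces A's index-based loops (range over positions + per-nucleotide modulo-10 counter) by a
-- consume-the-string while loop slicing off head line / rest, spacing each line by joining
-- 10-character pieces; objective: alternative decomposition, same output.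

-- f"{n:>6}" : right-align str(n) in width 6 (identical f-string prefix in A and B)
def pvPad6 (n : Int) : List Char :=
  List.replicate (6 - (PySem.Int.toChars n).length) ' ' ++ PySem.Int.toChars n

-- ===== PORT A =====
-- body of A's inner 'for j, nucleotide in enumerate(line)' loop
def pvStepA (acc : List Char) (p : Int × Char) : List Char :=
  (if 0 < p.1 ∧ PySem.Int.mod p.1 10 = 0 then acc ++ [' '] else acc) ++ [p.2]

def format_sequence_for_display (sequence : String) (line_length : Int) : String :=
  if sequence = "" then "" else
    String.ofList (PySem.Chars.join ['\n']
      ((PySem.List.pyRange 0 (sequence.toList.length : Int) line_length).foldl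
        (fun lines i =>
          lines ++ [pvPad6 (i + 1) ++ ':' :: ' ' ::
            (PySem.List.enumerate
              (PySem.List.slice sequence.toList (some i) (some (i + line_length)))).foldl pvStepA []])
        []))

-- ===== PORT B =====
-- inner 'while line: pieces.append(line[:10]); line = line[10:]'
def pvPieces (line : List Char) : List (List Char) :=
  if h : line = [] then []
  else line.take 10 :: pvPieces (line.drop 10)
termination_by line.length
decreasing_by
  have := List.length_pos_of_ne_nil h
  simp only [List.length_drop]
  omega

-- outer 'while rest and line_length > 0:' loop; rest[:L] / rest[L:] for 0 < L are take/drop (exact)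
def pvLoop (rest : List Char) (L : Int) (pos : Int) : List (List Char) :=
  if h : rest = [] ∨ ¬ 0 < L then []
  else (pvPad6 pos ++ ':' :: ' ' :: PySem.Chars.join [' '] (pvPieces (rest.take L.toNat)))
       :: pvLoop (rest.drop L.toNat) L (pos + L)
termination_by rest.length
decreasing_by
  rw [not_or] at h
  have h1 := List.length_pos_of_ne_nil h.1
  have h2 : 1 ≤ L.toNat := by omega
  simp only [List.length_drop]
  omega

def format_sequence_for_display_alt (sequence : String) (line_length : Int) : String :=
  String.ofList (PySem.Chars.join ['\n'] (pvLoop sequence.toList line_length 1))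

-- ===== PRECONDITION & SPEC =====
-- Pre_ excludes only inputs where the Python A raises: range(0, len(sequence), 0) is a
-- ValueError whenever the sequence is nonempty.
def Pre_format_sequence_for_display (sequence : String) (line_length : Int) : Prop :=
  sequence = "" ∨ line_length ≠ 0
instance (sequence : String) (line_length : Int) : Decidable (Pre_format_sequence_for_display sequence line_length) := by unfold Pre_format_sequence_for_display; infer_instance

def pvWitness_format_sequence_for_display : String × Int := ("ACGTACGTACGT", 5)

def Spec_format_sequence_for_display (sequence : String) (line_length : Int) (out : String) : Prop := out = format_sequence_for_display_alt sequence line_length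
instance (sequence : String) (line_length : Int) (out : String) : Decidable (Spec_format_sequence_for_display sequence line_length out) := by unfold Spec_format_sequence_for_display; infer_instance

-- ===== CLAIM (what is proved, stated in full; the proofs are below) =====
def Claim_equal_format_sequence_for_display : Prop := ∀ (sequence : String) (line_length : Int), Dom_format_sequence_for_display sequence line_length → Pre_format_sequence_for_display sequence line_length → Spec_format_sequence_for_display sequence line_length (format_sequence_for_display sequence line_length)

-- ===== LEMMAS AND PROOFS =====

-- A's inner loop as a structural recursion carrying the running index m.
def pvR : Nat → List Char → List Char
  | _, [] => []
  | m, c :: t => (if 0 < m ∧ m % 10 = 0 then [' '] else []) ++ c :: pvR (m + 1) t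

theorem pvR_nil (m : Nat) : pvR m [] = [] := rfl

theorem pvR_cons (m : Nat) (c : Char) (t : List Char) :
    pvR m (c :: t) = (if 0 < m ∧ m % 10 = 0 then [' '] else []) ++ c :: pvR (m + 1) t := rfl

theorem pvfold (l : List Char) : ∀ (m : Nat) (acc : List Char),
    (PySem.List.enumerate l (m : Int)).foldl pvStepA acc = acc ++ pvR m l := by
  induction l with
  | nil => intro m acc; simp [PySem.List.enumerate_nil, pvR_nil]
  | cons c t ih =>
    intro m acc
    rw [PySem.List.enumerate_cons, List.foldl_cons]
    have hmod : PySem.Int.mod (m : Int) 10 = (m : Int) % 10 :=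
      PySem.Int.mod_eq_emod_of_pos (by omega)
    have hiff : (0 < (m : Int) ∧ PySem.Int.mod (m : Int) 10 = 0) ↔ (0 < m ∧ m % 10 = 0) := by
      rw [hmod]; omega
    have hcast : (m : Int) + 1 = ((m + 1 : Nat) : Int) := by push_cast; ring
    by_cases h : 0 < m ∧ m % 10 = 0
    · rw [pvStepA, if_pos (hiff.mpr h), hcast, ih (m + 1), pvR_cons, if_pos h]
      simp
    · rw [pvStepA, if_neg (fun hc => h (hiff.mp hc)), hcast, ih (m + 1), pvR_cons, if_neg h]
      simp

-- mid-chunk (0 < m % 10) and chunk-start (0 < m, 10 ∣ m) characterisations of pvR, together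
theorem pvR_char : ∀ (n : Nat) (l : List Char), l.length ≤ n →
    (∀ m : Nat, 0 < m % 10 →
      pvR m l = l.take (10 - m % 10) ++ pvR 10 (l.drop (10 - m % 10))) ∧
    (∀ m : Nat, 0 < m → m % 10 = 0 → pvR m l = pvR 10 l) := by
  intro n
  induction n with
  | zero =>
    intro l hl
    have : l = [] := List.eq_nil_of_length_eq_zero (by omega)
    subst this
    exact ⟨fun m _ => by simp [pvR_nil], fun m _ _ => by simp [pvR_nil]⟩
  | succ n ih =>
    intro l hl
    cases l with
    | nil => exact ⟨fun m _ => by simp [pvR_nil], fun m _ _ => by simp [pvR_nil]⟩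
    | cons c t =>
      have ht : t.length ≤ n := by simp at hl; omega
      constructor
      · intro m hm
        rw [pvR_cons, if_neg (by omega)]
        by_cases h9 : m % 10 = 9
        · rw [show 10 - m % 10 = 0 + 1 by omega, List.take_succ_cons, List.drop_succ_cons,
            List.take_zero, List.drop_zero]
          by_cases htn : t = []
          · subst htn; simp [pvR_nil]
          · rw [(ih t ht).2 (m + 1) (by omega) (by omega)]
            simp
        · have hm1 : (m + 1) % 10 = m % 10 + 1 := by omega
          have hstep := (ih t ht).1 (m + 1) (by omega)
          rw [hstep, hm1]
          rw [show 10 - m % 10 = (10 - (m % 10 + 1)) + 1 by omega, List.take_succ_cons,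
            List.drop_succ_cons]
          simp
      · intro m hm hmod
        rw [pvR_cons, if_pos ⟨hm, hmod⟩, pvR_cons, if_pos (by omega)]
        by_cases htn : t = []
        · subst htn; simp [pvR_nil]
        · have h1 := (ih t ht).1 (m + 1) (by omega)
          have h2 := (ih t ht).1 11 (by omega)
          rw [show (m + 1) % 10 = 1 by omega] at h1
          rw [show (11 : Nat) % 10 = 1 by norm_num] at h2
          rw [h1, h2]

theorem pvR_zero_small (l : List Char) (h : l.length ≤ 10) : pvR 0 l = l := by
  cases l with
  | nil => simp [pvR_nil]
  | cons c t =>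
    rw [pvR_cons, if_neg (by omega)]
    have h9 : t.length ≤ 9 := by simp at h; omega
    rw [(pvR_char t.length t (le_refl _)).1 1 (by omega)]
    rw [List.drop_eq_nil_of_le (by omega : t.length ≤ 10 - 1 % 10), pvR_nil]
    simp [List.take_of_length_le (show t.length ≤ 10 - 1 % 10 by omega)]

theorem pvR_zero_big (l : List Char) (h : 10 < l.length) :
    pvR 0 l = l.take 10 ++ ' ' :: pvR 0 (l.drop 10) := by
  cases l with
  | nil => simp at h
  | cons c t =>
    have ht9 : (9 : Nat) < t.length := by simp at h; omega
    rw [pvR_cons, if_neg (by omega)]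
    have h1 := (pvR_char t.length t (le_refl _)).1 1 (by omega)
    rw [show (10 : Nat) - 1 % 10 = 9 by norm_num] at h1
    rw [h1]
    obtain ⟨d, u, hdu⟩ := List.exists_cons_of_ne_nil
      (show t.drop 9 ≠ [] from fun hc => by
        have := congrArg List.length hc
        simp only [List.length_drop, List.length_nil] at this
        omega)
    have hu : u.length ≤ t.length := by
      have := congrArg List.length hdu
      simp only [List.length_drop, List.length_cons] at this
      omega
    rw [hdu, pvR_cons (m := 10), if_pos (by omega)]
    have h2 := (pvR_char u.length u (le_refl _)).1 11 (by omega)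
    have h3 := (pvR_char u.length u (le_refl _)).1 1 (by omega)
    rw [show (11 : Nat) % 10 = 1 by norm_num] at h2
    rw [h2, ← h3]
    rw [show ((c :: t).take 10) = c :: t.take 9 by
      rw [show (10 : Nat) = 9 + 1 from rfl, List.take_succ_cons]]
    rw [show ((c :: t).drop 10) = t.drop 9 by
      rw [show (10 : Nat) = 9 + 1 from rfl, List.drop_succ_cons]]
    rw [hdu, pvR_cons (m := 0), if_neg (by omega)]
    simp

-- B's spaced line body equals A's: join of the 10-char pieces is pvR 0
theorem pvJoinPieces : ∀ (n : Nat) (l : List Char), l.length ≤ n →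
    PySem.Chars.join [' '] (pvPieces l) = pvR 0 l := by
  intro n
  induction n with
  | zero =>
    intro l hl
    have : l = [] := List.eq_nil_of_length_eq_zero (by omega)
    subst this
    rw [pvPieces, dif_pos rfl, PySem.Chars.join_nil, pvR_nil]
  | succ n ih =>
    intro l hl
    by_cases h : l = []
    · subst h; rw [pvPieces, dif_pos rfl, PySem.Chars.join_nil, pvR_nil]
    · have hpos : 0 < l.length := List.length_pos_of_ne_nil h
      rw [pvPieces, dif_neg h]
      by_cases h10 : l.length ≤ 10
      · have hd : l.drop 10 = [] := List.drop_eq_nil_of_le h10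
        rw [hd, pvPieces, dif_pos rfl, PySem.Chars.join_singleton,
          List.take_of_length_le h10, pvR_zero_small l h10]
      · have hdne : l.drop 10 ≠ [] := fun hc => by
          have := congrArg List.length hc
          simp only [List.length_drop, List.length_nil] at this
          omega
        have hdlen : (l.drop 10).length ≤ n := by
          simp only [List.length_drop]; omega
        have hP : pvPieces (l.drop 10) = (l.drop 10).take 10 :: pvPieces ((l.drop 10).drop 10) := by
          rw [pvPieces, dif_neg hdne]
        rw [hP, PySem.Chars.join_cons_cons, ← hP, ih (l.drop 10) hdlen,
          pvR_zero_big l (by omega)]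
        simp

-- generic: foldl appending singletons is map
theorem pvFoldlMap {α β : Type} (f : α → β) :
    ∀ (l : List α) (acc : List β),
      l.foldl (fun lines i => lines ++ [f i]) acc = acc ++ l.map f := by
  intro l
  induction l with
  | nil => intro acc; simp
  | cons x t ih => intro acc; simp [ih]

-- slice xs[a : a+L] for 0 ≤ a, 0 ≤ L in drop/take form
theorem pvSliceInt (xs : List Char) (a L : Int) (ha : 0 ≤ a) (hL : 0 ≤ L) :
    PySem.List.slice xs (some a) (some (a + L)) = (xs.drop a.toNat).take L.toNat := by
  have h := PySem.List.slice_natCast_add xs a.toNat L.toNat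
  rwa [Int.toNat_of_nonneg ha, Int.toNat_of_nonneg hL] at h

-- B's outer loop equals the map over range(0, len, L) that A's foldl produces (0 < L)
theorem pvLoopEq : ∀ (n : Nat) (rest : List Char), rest.length ≤ n →
    ∀ (L : Int), 0 < L → ∀ (pos : Int),
    pvLoop rest L pos =
      (PySem.List.pyRange 0 (rest.length : Int) L).map
        (fun i => pvPad6 (pos + i) ++ ':' :: ' ' ::
          pvR 0 (PySem.List.slice rest (some i) (some (i + L)))) := by
  intro n
  induction n with
  | zero =>
    intro rest hl L hL pos
    have h0 : rest = [] := List.eq_nil_of_length_eq_zero (by omega)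
    subst h0
    rw [pvLoop, dif_pos (Or.inl rfl), PySem.List.pyRange_of_pos 0 _ hL, if_neg (by simp)]
    simp
  | succ n ih =>
    intro rest hl L hL pos
    by_cases h : rest = []
    · subst h
      rw [pvLoop, dif_pos (Or.inl rfl), PySem.List.pyRange_of_pos 0 _ hL, if_neg (by simp)]
      simp
    · have hpos : 0 < rest.length := List.length_pos_of_ne_nil h
      have hLtn : 1 ≤ L.toNat := by omega
      have hLcast : ((L.toNat : Nat) : Int) = L := Int.toNat_of_nonneg (by omega)
      rw [pvLoop, dif_neg (by push_neg; exact ⟨h, hL⟩)]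
      rw [PySem.List.pyRange_of_pos 0 _ hL, if_pos (by exact_mod_cast hpos)]
      have hM1 : 1 ≤ ((rest.length : Int) - 0 + L - 1) / L := by
        rw [Int.le_ediv_iff_mul_le hL]; omega
      have hMsucc : (((rest.length : Int) - 0 + L - 1) / L).toNat
          = ((((rest.length : Int) - 0 + L - 1) / L).toNat - 1) + 1 := by omega
      rw [List.map_map, hMsucc, List.range_succ_eq_map, List.map_cons, List.map_map]
      have hdlen : (rest.drop L.toNat).length ≤ n := by
        simp only [List.length_drop]; omega
      congr 1
      · -- heads agree
        simp only [Function.comp_apply, Nat.cast_zero, mul_zero, add_zero, zero_add]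
        have hsl : PySem.List.slice rest (some 0) (some L) = rest.take L.toNat := by
          have h0 := pvSliceInt rest 0 L le_rfl hL.le
          rw [Int.toNat_zero, List.drop_zero, zero_add] at h0
          exact h0
        rw [hsl, pvJoinPieces (rest.take L.toNat).length _ le_rfl]
      · -- tails agree
        rw [ih (rest.drop L.toNat) hdlen L hL (pos + L)]
        by_cases hd : rest.drop L.toNat = []
        · -- last line: both tails are empty
          have hle : rest.length ≤ L.toNat := by
            have := congrArg List.length hd
            simp only [List.length_drop, List.length_nil] at this
            omega
          have hM2 : ((rest.length : Int) - 0 + L - 1) / L < 2 := by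
            rw [Int.ediv_lt_iff_lt_mul hL]; omega
          rw [hd, PySem.List.pyRange_of_pos 0 _ hL, if_neg (by simp)]
          have : (((rest.length : Int) - 0 + L - 1) / L).toNat - 1 = 0 := by omega
          rw [this]
          simp
        · -- at least one more line
          have hdpos : 0 < (rest.drop L.toNat).length := List.length_pos_of_ne_nil hd
          have hgt : L.toNat < rest.length := by
            simp only [List.length_drop] at hdpos; omega
          rw [PySem.List.pyRange_of_pos 0 _ hL, if_pos (by exact_mod_cast hdpos)]
          rw [List.map_map]
          have hdl : ((rest.drop L.toNat).length : Int) = (rest.length : Int) - L := by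
            simp only [List.length_drop]; omega
          have hkey : ((rest.length : Int) - 0 + L - 1) / L
              = (((rest.drop L.toNat).length : Int) - 0 + L - 1) / L + 1 := by
            have h2 := Int.add_mul_ediv_right (((rest.length : Int) - 0 + L - 1) - L) 1
              (ne_of_gt hL)
            rw [one_mul, sub_add_cancel] at h2
            rw [h2, hdl]
            ring_nf
          have hMM : (((rest.length : Int) - 0 + L - 1) / L).toNat - 1
              = ((((rest.drop L.toNat).length : Int) - 0 + L - 1) / L).toNat := by
            have hM0 : 0 ≤ (((rest.drop L.toNat).length : Int) - 0 + L - 1) / L := by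
              apply Int.ediv_nonneg _ hL.le
              omega
            omega
          rw [hMM]
          refine List.map_congr_left (fun k _ => ?_)
          simp only [Function.comp_apply]
          have hknn : (0:Int) ≤ L * (k : Int) := by positivity
          have hknn1 : (0:Int) ≤ L * ((k : Int) + 1) := by positivity
          have hcast1 : ((Nat.succ k : Nat) : Int) = (k : Int) + 1 := by push_cast; ring
          rw [hcast1]
          rw [pvSliceInt (rest.drop L.toNat) (0 + L * (k:Int)) L (by omega) hL.le]
          rw [pvSliceInt rest (0 + L * ((k:Int) + 1)) L (by omega) hL.le]
          have hpad : pos + L + (0 + L * (k:Int)) = pos + (0 + L * ((k:Int) + 1)) := by ring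
          have hidx : (0 + L * ((k:Int) + 1)).toNat = L.toNat + (0 + L * (k:Int)).toNat := by
            have e : (0:Int) + L * ((k:Int) + 1) = L + (0 + L * (k:Int)) := by ring
            rw [e, Int.toNat_add hL.le (by omega)]
          rw [hpad, hidx, List.drop_drop]

-- ===== VERDICT (by name: the statement is the Claim_ definition above) =====
theorem format_sequence_for_display_spec : Claim_equal_format_sequence_for_display := by
  intro sequence L _hdom hpre
  unfold Spec_format_sequence_for_display
  unfold format_sequence_for_display format_sequence_for_display_alt
  by_cases hs : sequence = ""
  · subst hs
    have h0 : "".toList = ([] : List Char) := rfl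
    rw [if_pos rfl, pvLoop, dif_pos (Or.inl h0), PySem.Chars.join_nil]
  · rw [if_neg hs]
    rcases lt_trichotomy L 0 with hneg | hzero | hposL
    · -- negative step: range is empty, B's loop guard fails: both give ""
      have hr : PySem.List.pyRange 0 (sequence.toList.length : Int) L = [] := by
        unfold PySem.List.pyRange
        rw [if_neg (by omega : ¬ (0:Int) < L),
          if_neg (by simp : ¬ ((sequence.toList.length : Int)) < 0)]
        simp
      rw [hr, pvLoop, dif_pos (Or.inr (by omega))]
      rfl
    · exact absurd hpre (by simp [Pre_format_sequence_for_display, hs, hzero])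
    · -- main case
      have hfold := pvFoldlMap (α := Int) (β := List Char)
        (fun i => pvPad6 (i + 1) ++ ':' :: ' ' ::
          (PySem.List.enumerate
            (PySem.List.slice sequence.toList (some i) (some (i + L)))).foldl pvStepA [])
        (PySem.List.pyRange 0 (sequence.toList.length : Int) L) []
      rw [hfold, List.nil_append]
      rw [pvLoopEq sequence.toList.length sequence.toList le_rfl L hposL 1]
      congr 1
      refine congrArg _ (List.map_congr_left (fun i _ => ?_))
      have h0 := pvfold (PySem.List.slice sequence.toList (some i) (some (i + L))) 0 []
      simp only [Nat.cast_zero] at h0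
      rw [h0, List.nil_append, add_comm 1 i]
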